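-- pv_equiv track=rewrite | github.com/Jv131103/estudos_python | problemas/exercicio185.py | agrupar
-- ===== SOURCE A (Python) =====
-- def agrupar(lista):
--     dicionario = {}
--
--     for valor in lista:
--         if valor not in dicionario:
--             dicionario[valor] = [valor]
--         else:
--             dicionario[valor].append(valor)
--
--     return dicionario
-- ===== SOURCE B (Python) =====
-- from collections import Counter
--
-- def agrupar(lista):
--     return {v: [v] * c for v, c in Counter(lista).items()}
-- ===== Notes on version B (the rewrite author's own statement) =====
-- stated objective: idiomatic
-- what changed: B counts occurrences in one Counter pass and then expands each value to [v]*count in a dict comprehension, instead of A's per-element membership test with conditional create-or-append.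
import Mathlib
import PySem

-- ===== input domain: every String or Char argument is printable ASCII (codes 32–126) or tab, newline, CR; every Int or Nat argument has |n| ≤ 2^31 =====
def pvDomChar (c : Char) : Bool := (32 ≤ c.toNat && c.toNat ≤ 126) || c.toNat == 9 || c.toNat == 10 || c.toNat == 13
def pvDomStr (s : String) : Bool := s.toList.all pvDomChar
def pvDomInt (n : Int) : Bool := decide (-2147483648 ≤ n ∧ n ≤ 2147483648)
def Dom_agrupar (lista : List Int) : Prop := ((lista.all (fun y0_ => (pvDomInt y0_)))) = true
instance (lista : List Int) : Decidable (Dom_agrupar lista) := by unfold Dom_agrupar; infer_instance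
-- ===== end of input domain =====

-- B replaces A's per-element create-or-append branch by a Counter pass followed by a
-- dict-comprehension expansion [v]*count (idiomatic; same asymptotic cost).

-- ===== PORT A =====
-- for valor in lista: if valor not in dicionario: dicionario[valor] = [valor]
--                     else: dicionario[valor].append(valor)
def agrupar (lista : List Int) : List (Int × List Int) :=
  (lista.foldl
    (fun d valor =>
      if d.contains valor = false then d.insert valor [valor]
      else d.modify valor [] (fun l => l ++ [valor]))
    PySem.Dict.empty).items

-- ===== PORT B =====
-- {v: [v]*c for v, c in Counter(lista).items()}
def agrupar_alt (lista : List Int) : List (Int × List Int) :=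
  (PySem.Dict.counter lista).items.map (fun p => (p.1, List.replicate p.2.toNat p.1))

-- ===== PRECONDITION & SPEC =====
def Spec_agrupar (lista : List Int) (out : List (Int × List Int)) : Prop := out = agrupar_alt lista
instance (lista : List Int) (out : List (Int × List Int)) : Decidable (Spec_agrupar lista out) := by unfold Spec_agrupar; infer_instance

-- ===== CLAIM (what is proved, stated in full; the proofs are below) =====
def Claim_equal_agrupar : Prop := ∀ (lista : List Int), Dom_agrupar lista → Spec_agrupar lista (agrupar lista)

-- ===== LEMMAS AND PROOFS =====

-- A's step function is the same as an unconditional modify-append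
theorem agrupar_step_eq :
    (fun (d : PySem.Dict Int (List Int)) (valor : Int) =>
      if d.contains valor = false then d.insert valor [valor]
      else d.modify valor [] (fun l => l ++ [valor]))
    = (fun d valor => d.modify valor [] (fun l => l ++ [valor])) := by
  funext d valor
  by_cases h : d.contains valor = false
  · simp [h, PySem.Dict.modify, PySem.Dict.getD_of_not_contains (d0 := ([] : List Int)) d h]
  · simp [h]

-- lookup in A's accumulated dict: each key maps to its occurrences so far
theorem getD_modify_append_loop (l : List Int) (d : PySem.Dict Int (List Int)) (c : Int) :
    (l.foldl (fun d valor => d.modify valor [] (fun l => l ++ [valor])) d).getD c []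
      = d.getD c [] ++ List.replicate (l.count c) c := by
  induction l generalizing d with
  | nil => simp
  | cons x xs ih =>
    simp only [List.foldl_cons, ih, List.count_cons]
    rw [PySem.Dict.getD_modify]
    by_cases hxc : c = x
    · subst hxc
      simp [List.replicate_succ, List.append_assoc]
    · simp [hxc, Ne.symm hxc]

theorem agrupar_eq (lista : List Int) :
    agrupar lista
      = (PySem.Set.ofList lista).map (fun k => (k, List.replicate (lista.count k) k)) := by
  unfold agrupar
  rw [agrupar_step_eq]
  have hkeys : (lista.foldl (fun d valor => d.modify valor [] (fun l => l ++ [valor]))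
      PySem.Dict.empty).keys = PySem.Set.ofList lista := by
    rw [PySem.Dict.keys_foldl_modify]
    simp [PySem.Dict.keys_empty, PySem.Set.update_nil_left]
  have hnd : (lista.foldl (fun d valor => d.modify valor [] (fun l => l ++ [valor]))
      PySem.Dict.empty).keys.Nodup := by
    rw [hkeys]; exact PySem.Set.nodup_ofList lista
  rw [PySem.Dict.items_eq_map_keys _ hnd ([] : List Int), hkeys]
  apply List.map_congr_left
  intro k _
  rw [getD_modify_append_loop]
  simp

-- ===== VERDICT (by name: the statement is the Claim_ definition above) =====
theorem agrupar_spec : Claim_equal_agrupar := by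
  intro lista _
  unfold Spec_agrupar agrupar_alt
  rw [agrupar_eq, PySem.Dict.items_counter, List.map_map]
  apply List.map_congr_left
  intro k _
  simp
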